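/- GENERATED by farm/mkstatement.py from design/units.tsv (unit `DGifGetImageDesc.1`) and the assertions of Gif/Spec/Seg_DGifGetImageDesc.lean — do not edit.
   THE STATEMENT of the proof unit `DGifGetImageDesc.1`: segment 1 of `DGifGetImageDesc` (22 instructions; entries 0x109460;
   exits 0x1094b5,0x10949a; ranges 0x109460-0x10949a,0x1094a7-0x1094b5)
   takes each of its entry assertions to one of its exit assertions (`Gif.Spec.DGifGetImageDesc.Seg1`), given the contracts of its callees.
   What the names mean: ProgX/Base/Spec/Basic.lean (the shared hypotheses), Gif/Spec/Seg_DGifGetImageDesc.lean (the assertions). The theorem to prove: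
   `theorem DGifGetImageDesc_1_ok : Gif.Spec.DGifGetImageDesc_1.Statement`. -/
import Gif.Code
import Gif.Dec.All
import Gif.Labels
import Gif.Spec.Desc
import Gif.Spec.Seg_DGifGetImageDesc
namespace Gif.Spec.DGifGetImageDesc_1
open X86 X86.User Asan

/-- The statement of unit `DGifGetImageDesc.1`. -/
def Statement : Prop :=
  ∀ (Lay : Layout) (_hLay : Lay.hi = 0x1000000) (μ : Microarch) (_hμ : UserX.MicroOK μ) (u₀ : State)
    (_hcode : HasCodeNat Lay u₀ Gif.L.DGifGetImageDesc.entry Gif.Code.code_DGifGetImageDesc.nat Gif.L.DGifGetImageDesc.size)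
    (_h_DGifGetImageHeader : ∀ (H : Heap) (rest : List Obj) (frames : List (Nat × FrameLayout)) (F : Forest) (R : Rd), Calls Lay μ ProgX.Base.WayInv (ProgX.Base.conv u₀) Gif.L.DGifGetImageHeader.entry (Gif.Spec.DGifGetImageHeader.spec H rest frames F R))
    (_h_asan_load8_noabort : Asan.SmallCheck Lay μ ProgX.Base.WayInv (ProgX.Base.CodeOK u₀) [.rax, .rcx, .rdx] 8 ProgX.Base.L.__asan_load8_noabort.entry)
    (_h_asan_load4_noabort : Asan.SmallCheck Lay μ ProgX.Base.WayInv (ProgX.Base.CodeOK u₀) [.rax, .rcx, .rdx] 4 ProgX.Base.L.__asan_load4_noabort.entry)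
    (_h_asan_store4_noabort : Asan.SmallCheck Lay μ ProgX.Base.WayInv (ProgX.Base.CodeOK u₀) [.rax, .rcx, .rdx] 4 ProgX.Base.L.__asan_store4_noabort.entry),
    Gif.Spec.DGifGetImageDesc.Seg1 Lay μ u₀

end Gif.Spec.DGifGetImageDesc_1
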